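-- pv_equiv track=rewrite | github.com/lumirevel/baekjoon | baek25490.py | minRangeConquer
-- ===== SOURCE A (Python) =====
-- def minRangeConquer(B, i, j):
--     if i == j:
--         return [(i,i,i)]
--     elif j < i:
--         return []
--     else:
--         minIndex = i
--         for nowIndex in range(i,j+1):
--             if B[minIndex] > B[nowIndex]:
--                 minIndex = nowIndex
--         return minRangeConquer(B, i, minIndex-1) + [(i, minIndex, j)] + minRangeConquer(B, minIndex+1, j)
-- ===== SOURCE B (Python) =====
-- def minRangeConquer(B, i, j):
--     # Alternative: instead of recursively splitting at the minimum, compute for each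
--     # index k the segment [l, r] on which k is the leftmost minimum, by scanning
--     # left over strictly larger values and right over greater-or-equal values.
--     # In-order emission of A's recursion tree is exactly increasing k.
--     if j < i:
--         return []
--     out = []
--     for k in range(i, j + 1):
--         l = k
--         while l > i and B[l - 1] > B[k]:
--             l -= 1
--         r = k
--         while r < j and B[r + 1] >= B[k]:
--             r += 1
--         out.append((l, k, r))
--     return out
-- ===== Notes on version B (the rewrite author's own statement) =====
-- stated objective: alternative
-- what changed: Instead of recursively splitting the range at its leftmost minimum (rebuilding lists at every level), B makes one pass over k = i..j and computes each emitted tuple (l,k,r) directly by scanning left over strictly larger values and right over greater-or-equal values, since A's in-order recursion emits exactly one tuple per index k, namely the maximal segment on which k is the leftmost minimum.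
import Mathlib
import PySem

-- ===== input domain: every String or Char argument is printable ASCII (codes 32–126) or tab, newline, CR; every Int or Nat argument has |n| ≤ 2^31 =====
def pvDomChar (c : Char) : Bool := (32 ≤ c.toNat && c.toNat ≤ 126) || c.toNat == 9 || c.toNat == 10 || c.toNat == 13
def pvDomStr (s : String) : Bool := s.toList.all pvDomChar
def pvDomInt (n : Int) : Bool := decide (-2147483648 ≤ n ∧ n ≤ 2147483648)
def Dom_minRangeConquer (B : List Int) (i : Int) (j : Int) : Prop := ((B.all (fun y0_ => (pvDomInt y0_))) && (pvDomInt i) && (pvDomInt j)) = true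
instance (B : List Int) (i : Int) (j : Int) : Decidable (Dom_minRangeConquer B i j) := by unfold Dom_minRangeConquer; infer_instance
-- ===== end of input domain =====

-- B replaces A's recursive split-at-minimum by a single pass computing each tuple's
-- segment bounds with two local scans (alternative decomposition, same worst-case cost).


-- ===== PORT A =====
-- B[k]: Python indexing; inputs where it would raise are outside Pre_ (default 0 never read there)
def pvV (B : List Int) (k : Int) : Int := (PySem.List.pyGet? B k).getD 0

-- the 'for nowIndex in range(i, j+1)' minimum-index loop of A
def pvFoldMin (B : List Int) (i : Int) (j : Int) : Int :=
  (PySem.List.pyRange i (j+1) 1).foldl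
    (fun minIndex nowIndex => if pvV B minIndex > pvV B nowIndex then nowIndex else minIndex) i

-- A's recursion, with a fuel bound on the recursion depth; the fuel (j + 1 - i).toNat
-- supplied by minRangeConquer never runs out (each recursive call shrinks the range)
def pvArec (B : List Int) : Nat → Int → Int → List (Int × Int × Int)
  | 0, _, _ => []
  | fuel+1, i, j =>
    if i = j then [(i, i, i)]
    else if j < i then []
    else
      let minIndex := pvFoldMin B i j
      pvArec B fuel i (minIndex - 1) ++ [(i, minIndex, j)] ++ pvArec B fuel (minIndex + 1) j

def minRangeConquer (B : List Int) (i : Int) (j : Int) : List (Int × Int × Int) :=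
  pvArec B (j + 1 - i).toNat i j

-- ===== PORT B =====
-- 'while l > i and B[l-1] > B[k]: l -= 1'; the fuel (l - i).toNat bounds the iterations
def pvLscan (v : Int → Int) (i : Int) (vk : Int) : Nat → Int → Int
  | 0, l => l
  | fuel+1, l => if i < l ∧ vk < v (l-1) then pvLscan v i vk fuel (l-1) else l

-- 'while r < j and B[r+1] >= B[k]: r += 1'; the fuel (j - r).toNat bounds the iterations
def pvRscan (v : Int → Int) (j : Int) (vk : Int) : Nat → Int → Int
  | 0, r => r
  | fuel+1, r => if r < j ∧ vk ≤ v (r+1) then pvRscan v j vk fuel (r+1) else r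

def minRangeConquer_alt (B : List Int) (i : Int) (j : Int) : List (Int × Int × Int) :=
  if j < i then []
  else
    (PySem.List.pyRange i (j+1) 1).map
      (fun k => (pvLscan (pvV B) i (pvV B k) (k - i).toNat k, k,
                 pvRscan (pvV B) j (pvV B k) (j - k).toNat k))

-- ===== PRECONDITION & SPEC =====
-- Pre_ excludes exactly the inputs where A raises IndexError: i < j with an index of the
-- range [i, j] outside Python's valid (negative-aware) index range of B. The i == j case
-- stays inside Pre_ (neither program indexes B there; both return [(i,i,i)]).
def Pre_minRangeConquer (B : List Int) (i : Int) (j : Int) : Prop :=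
  i < j → (-(B.length : Int) ≤ i ∧ j < (B.length : Int))
instance (B : List Int) (i : Int) (j : Int) : Decidable (Pre_minRangeConquer B i j) := by
  unfold Pre_minRangeConquer; infer_instance

def pvWitness_minRangeConquer : List Int × Int × Int := ([1, 0, 2], 0, 2)

def Spec_minRangeConquer (B : List Int) (i : Int) (j : Int) (out : List (Int × Int × Int)) : Prop := out = minRangeConquer_alt B i j
instance (B : List Int) (i : Int) (j : Int) (out : List (Int × Int × Int)) : Decidable (Spec_minRangeConquer B i j out) := by unfold Spec_minRangeConquer; infer_instance

-- ===== CLAIM (what is proved, stated in full; the proofs are below) =====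
def Claim_equal_minRangeConquer : Prop := ∀ (B : List Int) (i : Int) (j : Int), Dom_minRangeConquer B i j → Pre_minRangeConquer B i j → Spec_minRangeConquer B i j (minRangeConquer B i j)

-- ===== LEMMAS AND PROOFS =====

lemma pvFoldMin_base (B : List Int) (i : Int) : pvFoldMin B i i = i := by
  simp [pvFoldMin, PySem.List.pyRange_one_singleton]

lemma pvFoldMin_step (B : List Int) (i j : Int) (h : i < j) :
    pvFoldMin B i j =
      if pvV B (pvFoldMin B i (j-1)) > pvV B j then j else pvFoldMin B i (j-1) := by
  unfold pvFoldMin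
  have he : (j - 1 + 1 : Int) = j := by ring
  rw [he, PySem.List.pyRange_one_succ_right (by omega : i ≤ j), List.foldl_append]
  rfl

-- the minimum-index fold computes the leftmost minimum of pvV B on [i, j]
lemma pvFoldMin_spec (B : List Int) :
    ∀ (n : Nat) (i j : Int), (j - i).toNat = n → i ≤ j →
      i ≤ pvFoldMin B i j ∧ pvFoldMin B i j ≤ j ∧
      (∀ k, i ≤ k → k ≤ j → pvV B (pvFoldMin B i j) ≤ pvV B k) ∧
      (∀ p, i ≤ p → p < pvFoldMin B i j → pvV B (pvFoldMin B i j) < pvV B p) := by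
  intro n
  induction n with
  | zero =>
    intro i j h0 hij
    have hji : j = i := by omega
    subst hji
    rw [pvFoldMin_base]
    refine ⟨le_refl _, le_refl _, ?_, ?_⟩
    · intro k hk1 hk2
      have : k = j := by omega
      subst this; exact le_refl _
    · intro p hp1 hp2; omega
  | succ n ih =>
    intro i j h0 hij
    have hlt : i < j := by omega
    obtain ⟨h1, h2, h3, h4⟩ := ih i (j-1) (by omega) (by omega)
    rw [pvFoldMin_step B i j hlt]
    by_cases hv : pvV B (pvFoldMin B i (j-1)) > pvV B j
    · rw [if_pos hv]
      refine ⟨by omega, le_refl j, ?_, ?_⟩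
      · intro k hk1 hk2
        by_cases hkj : k = j
        · subst hkj; exact le_refl _
        · exact le_of_lt (lt_of_lt_of_le hv (h3 k hk1 (by omega)))
      · intro p hp1 hp2
        exact lt_of_lt_of_le hv (h3 p hp1 (by omega))
    · rw [if_neg hv]
      refine ⟨h1, by omega, ?_, h4⟩
      intro k hk1 hk2
      by_cases hkj : k = j
      · subst hkj; exact le_of_not_gt hv
      · exact h3 k hk1 (by omega)

-- lscan runs all the way down to i when every value strictly left of l is > vk
lemma pvLscan_all (v : Int → Int) (i vk : Int) :
    ∀ (n : Nat) (l : Int), (l - i).toNat ≤ n → i ≤ l →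
      (∀ p, i ≤ p → p < l → vk < v p) → pvLscan v i vk n l = i := by
  intro n
  induction n with
  | zero =>
    intro l h0 hil _
    have : l = i := by omega
    rw [this, pvLscan]
  | succ n ih =>
    intro l h0 hil hall
    by_cases hl : i < l
    · rw [pvLscan, if_pos ⟨hl, hall (l-1) (by omega) (by omega)⟩]
      exact ih (l-1) (by omega) (by omega) (fun p hp hpl => hall p hp (by omega))
    · have : l = i := by omega
      rw [this, pvLscan, if_neg (by rintro ⟨h1, -⟩; omega)]

-- rscan runs all the way up to j when every value strictly right of r is ≥ vk
lemma pvRscan_all (v : Int → Int) (j vk : Int) :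
    ∀ (n : Nat) (r : Int), (j - r).toNat ≤ n → r ≤ j →
      (∀ q, r < q → q ≤ j → vk ≤ v q) → pvRscan v j vk n r = j := by
  intro n
  induction n with
  | zero =>
    intro r h0 hrj _
    have : r = j := by omega
    rw [this, pvRscan]
  | succ n ih =>
    intro r h0 hrj hall
    by_cases hr : r < j
    · rw [pvRscan, if_pos ⟨hr, hall (r+1) (by omega) (by omega)⟩]
      exact ih (r+1) (by omega) (by omega) (fun q hq hqj => hall q (by omega) hqj)
    · have : r = j := by omega
      rw [this, pvRscan, if_neg (by rintro ⟨h1, -⟩; omega)]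

-- lscan never crosses an index m with v m ≤ vk: the left bound i can be tightened to m+1
lemma pvLscan_cut (v : Int → Int) (i vk m : Int) (him : i ≤ m) (hm : ¬ vk < v m) :
    ∀ (n' : Nat) (n : Nat) (l : Int), (l - (m+1)).toNat ≤ n' → (l - i).toNat ≤ n → m + 1 ≤ l →
      pvLscan v i vk n l = pvLscan v (m+1) vk n' l := by
  intro n'
  induction n' with
  | zero =>
    intro n l h0 hn hml
    have hl : l = m + 1 := by omega
    subst hl
    cases n with
    | zero => rw [pvLscan, pvLscan]
    | succ n =>
      have he : (m + 1 - 1 : Int) = m := by ring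
      rw [pvLscan, pvLscan, if_neg (by rintro ⟨-, h2⟩; rw [he] at h2; exact hm h2)]
  | succ n' ih =>
    intro n l h0 hn hml
    by_cases hl : m + 1 < l
    · cases n with
      | zero => omega
      | succ n =>
        rw [pvLscan, pvLscan]
        by_cases hv : vk < v (l-1)
        · rw [if_pos ⟨by omega, hv⟩, if_pos ⟨by omega, hv⟩]
          exact ih n (l-1) (by omega) (by omega) (by omega)
        · rw [if_neg (by rintro ⟨-, h2⟩; exact hv h2), if_neg (by rintro ⟨-, h2⟩; exact hv h2)]
    · have hl' : l = m + 1 := by omega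
      subst hl'
      cases n with
      | zero => rw [pvLscan, pvLscan, if_neg (by rintro ⟨h1, -⟩; omega)]
      | succ n =>
        have he : (m + 1 - 1 : Int) = m := by ring
        rw [pvLscan, pvLscan, if_neg (by rintro ⟨-, h2⟩; rw [he] at h2; exact hm h2),
          if_neg (by rintro ⟨h1, -⟩; omega)]

-- rscan never crosses an index m with v m < vk: the right bound j can be tightened to m-1
lemma pvRscan_cut (v : Int → Int) (j vk m : Int) (hmj : m ≤ j) (hm : v m < vk) :
    ∀ (n' : Nat) (n : Nat) (r : Int), ((m-1) - r).toNat ≤ n' → (j - r).toNat ≤ n → r ≤ m - 1 →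
      pvRscan v j vk n r = pvRscan v (m-1) vk n' r := by
  intro n'
  induction n' with
  | zero =>
    intro n r h0 hn hrm
    have hr : r = m - 1 := by omega
    subst hr
    cases n with
    | zero => rw [pvRscan, pvRscan]
    | succ n =>
      have he : (m - 1 + 1 : Int) = m := by ring
      rw [pvRscan, pvRscan, if_neg (by rintro ⟨-, h2⟩; rw [he] at h2; exact absurd hm (not_lt.mpr h2))]
  | succ n' ih =>
    intro n r h0 hn hrm
    by_cases hr : r < m - 1
    · cases n with
      | zero => omega
      | succ n =>
        rw [pvRscan, pvRscan]
        by_cases hv : vk ≤ v (r+1)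
        · rw [if_pos ⟨by omega, hv⟩, if_pos ⟨by omega, hv⟩]
          exact ih n (r+1) (by omega) (by omega) (by omega)
        · rw [if_neg (by rintro ⟨-, h2⟩; exact hv h2), if_neg (by rintro ⟨-, h2⟩; exact hv h2)]
    · have hr' : r = m - 1 := by omega
      subst hr'
      cases n with
      | zero => rw [pvRscan, pvRscan, if_neg (by rintro ⟨h1, -⟩; omega)]
      | succ n =>
        have he : (m - 1 + 1 : Int) = m := by ring
        rw [pvRscan, pvRscan, if_neg (by rintro ⟨-, h2⟩; rw [he] at h2; exact absurd hm (not_lt.mpr h2)),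
          if_neg (by rintro ⟨h1, -⟩; omega)]

lemma pv_main (B : List Int) :
    ∀ (n : Nat) (i j : Int), (j + 1 - i).toNat ≤ n →
      pvArec B n i j = minRangeConquer_alt B i j := by
  intro n
  induction n with
  | zero =>
    intro i j h
    have hji : j < i := by omega
    rw [pvArec, minRangeConquer_alt, if_pos hji]
  | succ n ih =>
    intro i j h
    by_cases hij : i = j
    · subst hij
      rw [pvArec, minRangeConquer_alt, if_pos rfl, if_neg (lt_irrefl i),
        PySem.List.pyRange_one_singleton, List.map_singleton]
      have he : (i - i : Int).toNat = 0 := by omega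
      rw [he, pvLscan, pvRscan]
    · by_cases hji : j < i
      · rw [pvArec, minRangeConquer_alt, if_neg hij, if_pos hji, if_pos hji]
      · have hlt : i < j := by omega
        obtain ⟨him, hmj, hmin, hleft⟩ := pvFoldMin_spec B (j - i).toNat i j rfl (by omega)
        set m := pvFoldMin B i j with hm
        rw [pvArec, if_neg hij, if_neg hji]
        show pvArec B n i (m-1) ++ [(i, m, j)] ++ pvArec B n (m+1) j
            = minRangeConquer_alt B i j
        rw [ih i (m-1) (by omega), ih (m+1) j (by omega)]
        conv_rhs => rw [minRangeConquer_alt, if_neg hji,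
          PySem.List.pyRange_one_append i m (j+1) him (by omega),
          PySem.List.pyRange_one_cons (by omega : m < j + 1),
          List.map_append, List.map_cons]
        have h1 : pvLscan (pvV B) i (pvV B m) (m - i).toNat m = i :=
          pvLscan_all (pvV B) i (pvV B m) (m - i).toNat m le_rfl him
            (fun p hp hpl => hleft p hp hpl)
        have h2 : pvRscan (pvV B) j (pvV B m) (j - m).toNat m = j :=
          pvRscan_all (pvV B) j (pvV B m) (j - m).toNat m le_rfl hmj
            (fun q hq1 hq2 => hmin q (by omega) hq2)
        have hL : minRangeConquer_alt B i (m-1) = (PySem.List.pyRange i m 1).map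
            (fun k => (pvLscan (pvV B) i (pvV B k) (k - i).toNat k, k,
                       pvRscan (pvV B) j (pvV B k) (j - k).toNat k)) := by
          by_cases hmi : m = i
          · rw [minRangeConquer_alt, if_pos (by omega), PySem.List.pyRange_one_eq_nil (by omega),
              List.map_nil]
          · rw [minRangeConquer_alt, if_neg (by omega)]
            have he : (m - 1 + 1 : Int) = m := by ring
            rw [he]
            apply List.map_congr_left
            intro k hk
            obtain ⟨hk1, hk2⟩ := PySem.List.mem_pyRange_one.mp hk
            have hcut := pvRscan_cut (pvV B) j (pvV B k) m hmj (hleft k hk1 hk2)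
              ((m - 1) - k).toNat (j - k).toNat k le_rfl le_rfl (by omega)
            rw [← hcut]
        have hR : minRangeConquer_alt B (m+1) j = (PySem.List.pyRange (m+1) (j+1) 1).map
            (fun k => (pvLscan (pvV B) i (pvV B k) (k - i).toNat k, k,
                       pvRscan (pvV B) j (pvV B k) (j - k).toNat k)) := by
          by_cases hmj' : m = j
          · rw [minRangeConquer_alt, if_pos (by omega), PySem.List.pyRange_one_eq_nil (by omega),
              List.map_nil]
          · rw [minRangeConquer_alt, if_neg (by omega)]
            apply List.map_congr_left
            intro k hk
            obtain ⟨hk1, hk2⟩ := PySem.List.mem_pyRange_one.mp hk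
            have hcut := pvLscan_cut (pvV B) i (pvV B k) m him
              (not_lt.mpr (hmin k (by omega) (by omega)))
              (k - (m + 1)).toNat (k - i).toNat k le_rfl le_rfl (by omega)
            rw [← hcut]
        rw [hL, hR, h1, h2]
        simp

-- ===== VERDICT (by name: the statement is the Claim_ definition above) =====
theorem minRangeConquer_spec : Claim_equal_minRangeConquer := by
  intro B i j _ _
  unfold Spec_minRangeConquer minRangeConquer
  exact pv_main B (j + 1 - i).toNat i j le_rfl
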